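-- pv_equiv track=rewrite | github.com/sherlock0717/AI_agent_bootstrap_pack_stage3 | scripts/run_intake_analysis.py | replace_common_english
-- ===== SOURCE A (Python) =====
-- def replace_common_english(text: str) -> str:
--     if not isinstance(text, str):
--         return text
--     replacements = {
--         "Analyze Raw Idea and Generate World Setting Draft": "分析原始想法并生成世界观草案",
--         "Draft Product Roadmap and Content Matrix Candidates": "生成产品路线与内容矩阵候选",
--         "Suggest Validation Directions Based on Trends": "提出验证方向建议",
--         "Outline AI Automation Tasks": "梳理 AI 自动化任务",
--         "Wait for Human Confirmation on Workflow Blueprint": "等待人工确认工作蓝图",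
--         "First-round blueprint focusing on direction clarification": "第一轮蓝图聚焦方向澄清",
--         "Execute task_1": "先阅读 intake_brief 并决定是否立项，然后再进入第一轮方向草案生成",
--     }
--     for k, v in replacements.items():
--         text = text.replace(k, v)
--     return text
-- ===== SOURCE B (Python) =====
-- _PAIRS = [
--     ("Analyze Raw Idea and Generate World Setting Draft", "分析原始想法并生成世界观草案"),
--     ("Draft Product Roadmap and Content Matrix Candidates", "生成产品路线与内容矩阵候选"),
--     ("Suggest Validation Directions Based on Trends", "提出验证方向建议"),
--     ("Outline AI Automation Tasks", "梳理 AI 自动化任务"),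
--     ("Wait for Human Confirmation on Workflow Blueprint", "等待人工确认工作蓝图"),
--     ("First-round blueprint focusing on direction clarification", "第一轮蓝图聚焦方向澄清"),
--     ("Execute task_1", "先阅读 intake_brief 并决定是否立项，然后再进入第一轮方向草案生成"),
-- ]
--
-- # every key starts with a distinct character, so a single left-to-right pass
-- # dispatching on the current character finds exactly the match the sequential
-- # replaces would perform
-- _BY_FIRST = {k[0]: (k, v) for k, v in _PAIRS}
--
-- def replace_common_english(text: str) -> str:
--     if not isinstance(text, str):
--         return text
--     out = []
--     i, n = 0, len(text)
--     while i < n: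
--         hit = _BY_FIRST.get(text[i])
--         if hit is not None and text.startswith(hit[0], i):
--             out.append(hit[1])
--             i += len(hit[0])
--         else:
--             out.append(text[i])
--             i += 1
--     return "".join(out)
-- ===== Notes on version B (the rewrite author's own statement) =====
-- stated objective: alternative
-- what changed: Replaces A's seven sequential full-text str.replace passes with one left-to-right scan that dispatches on the current character through a first-character index (all seven keys begin with distinct letters) and splices in the value on a match; equal because no key can start inside another key's match or inside a substituted value, proved for the concrete table.
import Mathlib
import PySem

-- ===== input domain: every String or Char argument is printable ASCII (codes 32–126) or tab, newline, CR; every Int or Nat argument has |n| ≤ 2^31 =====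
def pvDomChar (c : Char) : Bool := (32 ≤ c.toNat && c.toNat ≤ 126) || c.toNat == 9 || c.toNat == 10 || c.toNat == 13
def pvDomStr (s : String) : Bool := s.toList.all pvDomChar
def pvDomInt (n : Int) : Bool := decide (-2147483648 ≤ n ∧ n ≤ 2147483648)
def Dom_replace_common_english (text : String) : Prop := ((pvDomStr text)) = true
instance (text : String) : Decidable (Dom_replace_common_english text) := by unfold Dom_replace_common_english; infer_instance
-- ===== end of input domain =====

-- B replaces A's seven sequential full-text str.replace passes with one left-to-right scan
-- dispatching on the current character (all keys start with distinct letters); objective: alternative.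


-- ===== PORT A =====
-- 'if not isinstance(text, str): return text' is always False under the type convention.
-- the for-loop over replacements.items(), each step 'text = text.replace(k, v)':
def replace_common_english (text : String) : String :=
  String.mk (([
    ("Analyze Raw Idea and Generate World Setting Draft", "分析原始想法并生成世界观草案"),
    ("Draft Product Roadmap and Content Matrix Candidates", "生成产品路线与内容矩阵候选"),
    ("Suggest Validation Directions Based on Trends", "提出验证方向建议"),
    ("Outline AI Automation Tasks", "梳理 AI 自动化任务"),
    ("Wait for Human Confirmation on Workflow Blueprint", "等待人工确认工作蓝图"),
    ("First-round blueprint focusing on direction clarification", "第一轮蓝图聚焦方向澄清"),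
    ("Execute task_1", "先阅读 intake_brief 并决定是否立项，然后再进入第一轮方向草案生成")
  ] : List (String × String)).foldl
    (fun t kv => PySem.Chars.replace t kv.1.toList kv.2.toList) text.toList)

-- ===== PORT B =====
-- Source B's _BY_FIRST.get(text[i]): the first-character dispatch table (all keys start differently)
def pvHit (c : Char) : Option (String × String) :=
  if c = 'A' then some ("Analyze Raw Idea and Generate World Setting Draft", "分析原始想法并生成世界观草案")
  else if c = 'D' then some ("Draft Product Roadmap and Content Matrix Candidates", "生成产品路线与内容矩阵候选")
  else if c = 'S' then some ("Suggest Validation Directions Based on Trends", "提出验证方向建议")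
  else if c = 'O' then some ("Outline AI Automation Tasks", "梳理 AI 自动化任务")
  else if c = 'W' then some ("Wait for Human Confirmation on Workflow Blueprint", "等待人工确认工作蓝图")
  else if c = 'F' then some ("First-round blueprint focusing on direction clarification", "第一轮蓝图聚焦方向澄清")
  else if c = 'E' then some ("Execute task_1", "先阅读 intake_brief 并决定是否立项，然后再进入第一轮方向草案生成")
  else none

-- Source B's while-loop: at each position try the (unique) candidate keyed by the current
-- character; on a full-key match ('text.startswith(hit[0], i)') emit the value and skip
-- the key, else copy one character
def pvGo : List Char → List Char
  | [] => []
  | c :: t =>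
    match pvHit c with
    | some kv =>
      if kv.1.toList.isPrefixOf (c :: t) then
        -- the key is nonempty and starts with c, so the rest of the text is t.drop (|k|-1)
        kv.2.toList ++ pvGo (t.drop (kv.1.toList.length - 1))
      else c :: pvGo t
    | none => c :: pvGo t
termination_by s => s.length
decreasing_by all_goals (simp only [List.length_drop, List.length_cons]; omega)

def replace_common_english_alt (text : String) : String :=
  String.mk (pvGo text.toList)

-- ===== PRECONDITION & SPEC =====
def Spec_replace_common_english (text : String) (out : String) : Prop := out = replace_common_english_alt text
instance (text : String) (out : String) : Decidable (Spec_replace_common_english text out) := by unfold Spec_replace_common_english; infer_instance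

-- ===== CLAIM (what is proved, stated in full; the proofs are below) =====
def Claim_equal_replace_common_english : Prop := ∀ (text : String), Dom_replace_common_english text → Spec_replace_common_english text (replace_common_english text)

-- ===== LEMMAS AND PROOFS =====

-- the replacements table as char lists, for the proofs
def pvTable : List (List Char × List Char) :=
  [ ("Analyze Raw Idea and Generate World Setting Draft".toList, "分析原始想法并生成世界观草案".toList),
    ("Draft Product Roadmap and Content Matrix Candidates".toList, "生成产品路线与内容矩阵候选".toList),
    ("Suggest Validation Directions Based on Trends".toList, "提出验证方向建议".toList),
    ("Outline AI Automation Tasks".toList, "梳理 AI 自动化任务".toList),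
    ("Wait for Human Confirmation on Workflow Blueprint".toList, "等待人工确认工作蓝图".toList),
    ("First-round blueprint focusing on direction clarification".toList, "第一轮蓝图聚焦方向澄清".toList),
    ("Execute task_1".toList, "先阅读 intake_brief 并决定是否立项，然后再进入第一轮方向草案生成".toList) ]

-- pvHit, lowered to char lists
def pvHitL (c : Char) : Option (List Char × List Char) :=
  (pvHit c).map (fun kv => (kv.1.toList, kv.2.toList))

-- Python str.replace with a NONEMPTY old = o :: os, in plain structural form
def pvRepl (o : Char) (os w : List Char) : List Char → List Char
  | [] => []
  | c :: t =>
    if (o :: os).isPrefixOf (c :: t) then w ++ pvRepl o os w (t.drop os.length)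
    else c :: pvRepl o os w t
termination_by s => s.length
decreasing_by all_goals (simp only [List.length_drop, List.length_cons]; omega)

-- str.replace for an arbitrary key (an empty key never occurs in pvTable)
def pvReplL (k w s : List Char) : List Char :=
  match k with
  | [] => s
  | o :: os => pvRepl o os w s

-- the sequential multi-pass loop of A, on pvReplL
def pvF (ps : List (List Char × List Char)) (s : List Char) : List Char :=
  ps.foldl (fun t kv => pvReplL kv.1 kv.2 t) s

-- 'no occurrence of k can start at a position p < |u| of u ++ x, whatever x is'
def pvNoEdge (u k : List Char) : Prop :=
  ∀ p, p < u.length → ¬ (k <+: u.drop p) ∧ ¬ (u.drop p <+: k)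

-- table invariants that make the single pass equal to the sequential passes:
-- keys and values nonempty, every value starts with a char in H, no key char is in H,
-- and pairwise (earlier e, later l): no occurrence of e.1 can start inside an l.1 match,
-- and l.1 cannot start inside the substituted value e.2.
def pvGood (H : List Char) (ps : List (List Char × List Char)) : Prop :=
  (∀ kv ∈ ps, kv.1 ≠ [] ∧ kv.2 ≠ [] ∧ kv.2.head! ∈ H ∧ ∀ c ∈ kv.1, c ∉ H) ∧
  List.Pairwise (fun e l => pvNoEdge l.1 e.1 ∧ l.1.head! ∉ e.2) ps

def pvHeads : List Char := ['分', '生', '提', '梳', '等', '第', '先']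

-- 'y is t with some prefix kept and the rest (if any) starting with a substituted value head'
def pvNice (H t y : List Char) : Prop :=
  y = t ∨ ∃ p zc ztl, y = t.take p ++ zc :: ztl ∧ zc ∈ H

-- Bool mirrors of pvGood, so the table facts are checked by kernel evaluation
def pvNoEdgeB (u k : List Char) : Bool :=
  (List.range u.length).all (fun p => !(k.isPrefixOf (u.drop p)) && !((u.drop p).isPrefixOf k))
def pvRowB (H : List Char) (kv : List Char × List Char) : Bool :=
  !kv.1.isEmpty && !kv.2.isEmpty && H.contains kv.2.head! && kv.1.all (fun c => !H.contains c)
def pvPairB (e l : List Char × List Char) : Bool :=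
  pvNoEdgeB l.1 e.1 && !e.2.contains l.1.head!
def pvPairwiseB : List (List Char × List Char) → Bool
  | [] => true
  | kv :: rest => rest.all (pvPairB kv) && pvPairwiseB rest
def pvGoodB (H : List Char) (ps : List (List Char × List Char)) : Bool :=
  ps.all (pvRowB H) && pvPairwiseB ps

theorem pvNoEdgeB_sound (u k : List Char) (h : pvNoEdgeB u k = true) : pvNoEdge u k := by
  intro p hp
  have := List.all_eq_true.mp h p (List.mem_range.mpr hp)
  simp only [Bool.and_eq_true, Bool.not_eq_true'] at this
  constructor
  · intro hc; rw [← List.isPrefixOf_iff_prefix] at hc; simp [hc] at this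
  · intro hc; rw [← List.isPrefixOf_iff_prefix] at hc; simp [hc] at this

theorem pvPairwiseB_sound (ps : List (List Char × List Char)) (h : pvPairwiseB ps = true) :
    List.Pairwise (fun e l => pvNoEdge l.1 e.1 ∧ l.1.head! ∉ e.2) ps := by
  induction ps with
  | nil => exact List.Pairwise.nil
  | cons kv rest ih =>
    simp only [pvPairwiseB, Bool.and_eq_true] at h
    refine List.Pairwise.cons (fun l hl => ?_) (ih h.2)
    have := List.all_eq_true.mp h.1 l hl
    simp only [pvPairB, Bool.and_eq_true, Bool.not_eq_true'] at this
    exact ⟨pvNoEdgeB_sound _ _ this.1, by simpa using this.2⟩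

theorem pvGoodB_sound (H : List Char) (ps : List (List Char × List Char))
    (h : pvGoodB H ps = true) : pvGood H ps := by
  simp only [pvGoodB, Bool.and_eq_true] at h
  refine ⟨fun kv hkv => ?_, pvPairwiseB_sound ps h.2⟩
  have := List.all_eq_true.mp h.1 kv hkv
  simp only [pvRowB, Bool.and_eq_true, Bool.not_eq_true'] at this
  obtain ⟨⟨⟨h1, h2⟩, h3⟩, h4⟩ := this
  refine ⟨by simpa [List.isEmpty_iff] using h1, by simpa [List.isEmpty_iff] using h2,
    by simpa using h3, fun c hc => by have := List.all_eq_true.mp h4 c hc; simpa using this⟩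

theorem pvTableGood : pvGood pvHeads pvTable := pvGoodB_sound _ _ (by rfl)

theorem pvTableNodup : pvTable.Nodup := by decide

-- the dispatch table agrees with pvTable: every table row is found under its key's head …
theorem pvHitL_mem : ∀ kv ∈ pvTable, pvHitL kv.1.head! = some kv := by decide

-- … and everything the dispatch returns is a table row filed under its key's head
theorem pvHitL_sound (c : Char) (kv : List Char × List Char) (h : pvHitL c = some kv) :
    kv ∈ pvTable ∧ kv.1.head! = c := by
  unfold pvHitL pvHit at h
  split_ifs at h with h1 h2 h3 h4 h5 h6 h7 <;>
    simp only [Option.map_some, Option.map_none, Option.some.injEq, reduceCtorEq] at h <;>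
    subst_vars <;> exact ⟨by decide, by decide⟩

-- a table key that prefixes c :: t starts with c
theorem pvPrefixHead (kv : List Char × List Char) (hm : kv ∈ pvTable) (c : Char) (t : List Char)
    (hpre : kv.1 <+: (c :: t)) : kv.1.head! = c := by
  have hne : kv.1 ≠ [] := (pvTableGood.1 kv hm).1
  cases hk : kv.1 with
  | nil => exact absurd hk hne
  | cons a b =>
    rw [hk] at hpre
    simp only [List.head!]
    exact (List.cons_prefix_cons.mp hpre).1

-- unfolding pvGo one step, with the dispatch result known
theorem pvGo_none (c : Char) (t : List Char) (h : pvHit c = none) :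
    pvGo (c :: t) = c :: pvGo t := by
  rw [pvGo, h]

theorem pvGo_some (c : Char) (t : List Char) (p : String × String) (h : pvHit c = some p) :
    pvGo (c :: t) = if p.1.toList.isPrefixOf (c :: t) then
        p.2.toList ++ pvGo (t.drop (p.1.toList.length - 1))
      else c :: pvGo t := by
  rw [pvGo, h]

-- PySem.Chars.replace with nonempty old is pvRepl
theorem pvReplaceGo (o : Char) (os w : List Char) :
    ∀ fuel l acc, l.length ≤ fuel →
      PySem.Chars.replace.go (o :: os) w fuel l acc = acc.reverse ++ pvRepl o os w l := by
  intro fuel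
  induction fuel with
  | zero =>
    intro l acc hl
    have : l = [] := by cases l <;> simp_all
    subst this
    rw [PySem.Chars.replace.go.eq_def, pvRepl]
    try simp
  | succ n ih =>
    intro l acc hl
    cases l with
    | nil => rw [PySem.Chars.replace.go.eq_def, pvRepl]; try simp
    | cons c t =>
      rw [PySem.Chars.replace.go.eq_def, pvRepl]
      simp only [List.length_cons]
      split
      · rw [ih _ _ (by simp only [List.length_cons, List.length_drop] at *; omega)]
        simp [List.append_assoc]
      · rw [ih _ _ (by simp only [List.length_cons] at hl; omega)]
        simp

theorem pvReplaceEq (o : Char) (os w s : List Char) :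
    PySem.Chars.replace s (o :: os) w = pvRepl o os w s := by
  rw [PySem.Chars.replace]
  simp only [List.isEmpty_cons, if_neg Bool.false_ne_true]
  rw [pvReplaceGo o os w s.length s [] (le_refl _)]
  simp

theorem pvFoldEq (ps : List (List Char × List Char)) :
    (∀ kv ∈ ps, kv.1 ≠ []) → ∀ s,
      ps.foldl (fun t kv => PySem.Chars.replace t kv.1 kv.2) s = pvF ps s := by
  induction ps with
  | nil => intro _ s; rfl
  | cons kv rest ih =>
    intro h s
    obtain ⟨o, os, hk⟩ : ∃ o os, kv.1 = o :: os := by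
      cases hkv : kv.1 with
      | nil => exact absurd hkv (h kv (by simp))
      | cons a b => exact ⟨a, b, rfl⟩
    show List.foldl _ (PySem.Chars.replace s kv.1 kv.2) rest = pvF rest (pvReplL kv.1 kv.2 s)
    rw [hk, pvReplaceEq, ih (fun x hx => h x (by simp [hx]))]
    rfl

-- shape of one replace pass: unchanged, or the first change splices in w
theorem pvShape (o : Char) (os w : List Char) :
    ∀ y, pvRepl o os w y = y ∨ ∃ q rest, pvRepl o os w y = y.take q ++ w ++ rest := by
  have key : ∀ n (y : List Char), y.length ≤ n →
      (pvRepl o os w y = y ∨ ∃ q rest, pvRepl o os w y = y.take q ++ w ++ rest) := by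
    intro n
    induction n with
    | zero =>
      intro y hy
      have : y = [] := by cases y <;> simp_all
      subst this; left; rw [pvRepl]
    | succ n ih =>
      intro y hy
      cases y with
      | nil => left; rw [pvRepl]
      | cons c t =>
        rw [pvRepl]
        split
        · right; exact ⟨0, pvRepl o os w (t.drop os.length), by simp⟩
        · rcases ih t (by simp only [List.length_cons] at hy; omega) with h | ⟨q, rest, h⟩
          · left; rw [h]
          · right; exact ⟨q + 1, rest, by rw [h]; simp⟩
  exact fun y => key y.length y (le_refl _)

theorem pvNiceRepl (H t : List Char) (o : Char) (os w : List Char)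
    (hw : w ≠ []) (hwh : w.head! ∈ H) :
    ∀ y, pvNice H t y → pvNice H t (pvRepl o os w y) := by
  intro y hn
  rcases pvShape o os w y with h | ⟨q, rest, h⟩
  · rw [h]; exact hn
  · obtain ⟨wc, wtl, rfl⟩ : ∃ wc wtl, w = wc :: wtl := by
      cases w with
      | nil => exact absurd rfl hw
      | cons a b => exact ⟨a, b, rfl⟩
    have hwc : wc ∈ H := by simpa using hwh
    rcases hn with rfl | ⟨p, zc, ztl, rfl, hzc⟩
    · right; exact ⟨q, wc, wtl ++ rest, by rw [h]; simp, hwc⟩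
    · by_cases hq : q ≤ (t.take p).length
      · right
        refine ⟨min q p, wc, wtl ++ rest, ?_, hwc⟩
        rw [h, List.take_append]
        have h0 : q - (t.take p).length = 0 := by omega
        rw [h0]
        simp [List.take_take]
      · right
        refine ⟨p, zc, ztl.take (q - (t.take p).length - 1) ++ wc :: wtl ++ rest, ?_, hzc⟩
        rw [h, List.take_append]
        have h1 : (t.take p).take q = t.take p := List.take_of_length_le (by omega)
        obtain ⟨m, hm⟩ : ∃ m, q - (t.take p).length = m + 1 := ⟨_, (Nat.succ_pred_eq_of_pos (by omega)).symm⟩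
        rw [h1, hm]
        simp

theorem pvNiceNoNewMatch (H t y : List Char) (c₀ o : Char) (os : List Char)
    (hn : pvNice H t y) (hk : ∀ c ∈ (o :: os), c ∉ H)
    (h0 : ¬ (o :: os) <+: (c₀ :: t)) : ¬ (o :: os) <+: (c₀ :: y) := by
  intro hpre
  rw [List.cons_prefix_cons] at hpre
  obtain ⟨rfl, hos⟩ := hpre
  rcases hn with rfl | ⟨p, zc, ztl, rfl, hzc⟩
  · exact h0 (List.cons_prefix_cons.mpr ⟨rfl, hos⟩)
  · by_cases hlen : os.length ≤ (t.take p).length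
    · have h1 : os <+: t.take p := by
        rw [List.prefix_iff_eq_take] at hos ⊢
        rw [hos, List.take_append]
        have h2 : os.length - (t.take p).length = 0 := by omega
        rw [h2]
        simp
      exact h0 (List.cons_prefix_cons.mpr ⟨rfl, h1.trans (List.take_prefix p t)⟩)
    · have hL : t.take p <+: os := by
        rcases List.prefix_or_prefix_of_prefix hos (List.prefix_append (t.take p) (zc :: ztl)) with h2 | h2
        · exact absurd h2.length_le (by omega)
        · exact h2
      obtain ⟨os', rfl⟩ := hL
      have hos' : os' <+: zc :: ztl := by
        rwa [List.prefix_append_right_inj] at hos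
      cases os' with
      | nil => simp at hlen
      | cons a tl =>
        have ha : a = zc := (List.cons_prefix_cons.mp hos').1
        exact hk a (by simp) (ha ▸ hzc)

-- a pass slides over a block u no key occurrence can start in
theorem pvReplAppendNoEdge (o : Char) (os w : List Char) :
    ∀ u, pvNoEdge u (o :: os) → ∀ x, pvRepl o os w (u ++ x) = u ++ pvRepl o os w x := by
  intro u
  induction u with
  | nil => intro _ x; simp
  | cons a u' ih =>
    intro hNE x
    have hnp : ¬ (o :: os) <+: (a :: (u' ++ x)) := by
      intro hpre
      have hu : (a :: u') <+: ((a :: u') ++ x) := List.prefix_append _ _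
      have h0 := hNE 0 (by simp)
      rcases List.prefix_or_prefix_of_prefix hpre hu with h2 | h2
      · exact h0.1 (by simpa using h2)
      · exact h0.2 (by simpa using h2)
    show pvRepl o os w (a :: (u' ++ x)) = _
    rw [pvRepl, if_neg (by rw [List.isPrefixOf_iff_prefix]; exact hnp)]
    rw [ih (fun p hp => by
      have := hNE (p + 1) (by simp only [List.length_cons]; omega)
      simpa using this) x]
    simp

-- a pass slides over a block whose chars all differ from the key head
theorem pvReplAppendBarrier (o : Char) (os w : List Char) :
    ∀ v, (∀ c ∈ v, c ≠ o) → ∀ x, pvRepl o os w (v ++ x) = v ++ pvRepl o os w x := by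
  intro v
  induction v with
  | nil => intro _ x; simp
  | cons a v' ih =>
    intro hv x
    have hnp : ¬ (o :: os) <+: (a :: (v' ++ x)) := by
      intro hpre
      exact hv a (by simp) ((List.cons_prefix_cons.mp hpre).1.symm)
    show pvRepl o os w (a :: (v' ++ x)) = _
    rw [pvRepl, if_neg (by rw [List.isPrefixOf_iff_prefix]; exact hnp)]
    rw [ih (fun c hc => hv c (by simp [hc])) x]
    simp

theorem pvReplSelf (o : Char) (os w y : List Char) :
    pvRepl o os w ((o :: os) ++ y) = w ++ pvRepl o os w y := by
  show pvRepl o os w (o :: (os ++ y)) = _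
  rw [pvRepl, if_pos (by rw [List.isPrefixOf_iff_prefix]; exact List.prefix_append _ _)]
  rw [List.drop_left]

theorem pvFNil (ps : List (List Char × List Char)) : pvF ps [] = [] := by
  induction ps with
  | nil => rfl
  | cons kv rest ih =>
    show pvF rest (pvReplL kv.1 kv.2 []) = []
    have : pvReplL kv.1 kv.2 [] = [] := by
      cases kv.1 with
      | nil => rfl
      | cons o os => show pvRepl o os kv.2 [] = []; rw [pvRepl]
    rw [this, ih]

theorem pvFSplit (ps₁ ps₂ : List (List Char × List Char)) (s : List Char) :
    pvF (ps₁ ++ ps₂) s = pvF ps₂ (pvF ps₁ s) := List.foldl_append ..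

theorem pvFAppendNoEdge (k : List Char) :
    ∀ ps, (∀ kv ∈ ps, kv.1 ≠ [] ∧ pvNoEdge k kv.1) →
      ∀ x, pvF ps (k ++ x) = k ++ pvF ps x := by
  intro ps
  induction ps with
  | nil => intro _ x; rfl
  | cons kv rest ih =>
    intro h x
    obtain ⟨o, os, hk⟩ : ∃ o os, kv.1 = o :: os := by
      cases hkv : kv.1 with
      | nil => exact absurd hkv (h kv (by simp)).1
      | cons a b => exact ⟨a, b, rfl⟩
    show pvF rest (pvReplL kv.1 kv.2 (k ++ x)) = k ++ pvF rest (pvReplL kv.1 kv.2 x)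
    rw [hk]
    show pvF rest (pvRepl o os kv.2 (k ++ x)) = k ++ pvF rest (pvRepl o os kv.2 x)
    rw [pvReplAppendNoEdge o os kv.2 k (hk ▸ (h kv (by simp)).2) x]
    exact ih (fun z hz => h z (by simp [hz])) (pvRepl o os kv.2 x)

theorem pvFAppendBarrier (v : List Char) :
    ∀ ps, (∀ kv ∈ ps, kv.1 ≠ [] ∧ kv.1.head! ∉ v) →
      ∀ x, pvF ps (v ++ x) = v ++ pvF ps x := by
  intro ps
  induction ps with
  | nil => intro _ x; rfl
  | cons kv rest ih =>
    intro h x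
    obtain ⟨o, os, hk⟩ : ∃ o os, kv.1 = o :: os := by
      cases hkv : kv.1 with
      | nil => exact absurd hkv (h kv (by simp)).1
      | cons a b => exact ⟨a, b, rfl⟩
    show pvF rest (pvReplL kv.1 kv.2 (v ++ x)) = v ++ pvF rest (pvReplL kv.1 kv.2 x)
    rw [hk]
    show pvF rest (pvRepl o os kv.2 (v ++ x)) = v ++ pvF rest (pvRepl o os kv.2 x)
    have ho : ∀ c ∈ v, c ≠ o := by
      intro c hc hco
      have := (h kv (by simp)).2
      rw [hk] at this
      simp only [List.head!] at this
      exact this (hco ▸ hc)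
    rw [pvReplAppendBarrier o os kv.2 v ho x]
    exact ih (fun z hz => h z (by simp [hz])) (pvRepl o os kv.2 x)

theorem pvFConsOfNoMatch (H : List Char) (c : Char) (t : List Char) :
    ∀ ps, (∀ kv ∈ ps, kv.1 ≠ [] ∧ kv.2 ≠ [] ∧ kv.2.head! ∈ H ∧ ∀ ch ∈ kv.1, ch ∉ H) →
      (∀ kv ∈ ps, ¬ kv.1 <+: (c :: t)) →
      ∀ y, pvNice H t y → pvF ps (c :: y) = c :: pvF ps y ∧ pvNice H t (pvF ps y) := by
  intro ps
  induction ps with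
  | nil => intro _ _ y hy; exact ⟨rfl, hy⟩
  | cons kv rest ih =>
    intro hC hnp y hy
    obtain ⟨o, os, hk⟩ : ∃ o os, kv.1 = o :: os := by
      cases hkv : kv.1 with
      | nil => exact absurd hkv (hC kv (by simp)).1
      | cons a b => exact ⟨a, b, rfl⟩
    have hkH : ∀ ch ∈ (o :: os), ch ∉ H := hk ▸ (hC kv (by simp)).2.2.2
    have hnm : ¬ (o :: os) <+: (c :: y) :=
      pvNiceNoNewMatch H t y c o os hy hkH (hk ▸ hnp kv (by simp))
    have hstep : pvRepl o os kv.2 (c :: y) = c :: pvRepl o os kv.2 y := by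
      rw [pvRepl, if_neg (by rw [List.isPrefixOf_iff_prefix]; exact hnm)]
    have hnice : pvNice H t (pvRepl o os kv.2 y) :=
      pvNiceRepl H t o os kv.2 (hC kv (by simp)).2.1 (hC kv (by simp)).2.2.1 y hy
    have hrest := ih (fun z hz => hC z (by simp [hz])) (fun z hz => hnp z (by simp [hz]))
      (pvRepl o os kv.2 y) hnice
    constructor
    · show pvF rest (pvReplL kv.1 kv.2 (c :: y)) = c :: pvF rest (pvReplL kv.1 kv.2 y)
      rw [hk]
      show pvF rest (pvRepl o os kv.2 (c :: y)) = c :: pvF rest (pvRepl o os kv.2 y)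
      rw [hstep]
      exact hrest.1
    · show pvNice H t (pvF rest (pvReplL kv.1 kv.2 y))
      rw [hk]
      exact hrest.2

-- the heart: A's sequential passes compute B's single head-dispatched pass
theorem pvMainGo : ∀ s, pvF pvTable s = pvGo s := by
  have hg := pvTableGood
  have key : ∀ n (s : List Char), s.length ≤ n → pvF pvTable s = pvGo s := by
    intro n
    induction n with
    | zero =>
      intro s hs
      have : s = [] := by cases s <;> simp_all
      subst this
      rw [pvFNil, pvGo]
    | succ n ih =>
      intro s hs
      cases s with
      | nil => rw [pvFNil, pvGo]
      | cons c t =>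
        cases hfm : pvHitL c with
        | none =>
          have hhit : pvHit c = none := by
            unfold pvHitL at hfm
            exact Option.map_eq_none_iff.mp hfm
          have hnp : ∀ kv ∈ pvTable, ¬ kv.1 <+: (c :: t) := by
            intro kv hm hpre
            have hh := pvPrefixHead kv hm c t hpre
            have := pvHitL_mem kv hm
            rw [hh, hfm] at this
            simp at this
          have h4 := pvFConsOfNoMatch pvHeads c t pvTable hg.1 hnp t (Or.inl rfl)
          rw [h4.1, ih t (by simp only [List.length_cons] at hs; omega), pvGo_none c t hhit]
        | some klvl =>
          obtain ⟨kl, vl⟩ := klvl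
          obtain ⟨p, hp1, hp2⟩ : ∃ p, pvHit c = some p ∧ (p.1.toList, p.2.toList) = (kl, vl) := by
            unfold pvHitL at hfm
            rcases Option.map_eq_some_iff.mp hfm with ⟨p, hp1, hp2⟩
            exact ⟨p, hp1, hp2⟩
          have hk1 : p.1.toList = kl := (Prod.mk.injEq .. ▸ hp2).1
          have hk2 : p.2.toList = vl := (Prod.mk.injEq .. ▸ hp2).2
          have hmem : (kl, vl) ∈ pvTable ∧ (kl, vl).1.head! = c := pvHitL_sound c (kl, vl) hfm
          by_cases hpre : kl <+: (c :: t)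
          · -- a match: decompose the table around (kl, vl) and splice
            obtain ⟨ps₁, ps₂, heq⟩ := List.append_of_mem hmem.1
            have hnotin : (kl, vl) ∉ ps₁ := by
              have := pvTableNodup
              rw [heq] at this
              rcases List.nodup_append.mp this with ⟨_, h2, hdisj⟩
              intro hin
              exact hdisj _ hin _ (by simp) rfl
            have hps₁ : ∀ kv ∈ ps₁, ¬ kv.1 <+: (c :: t) := by
              intro kv hin hp'
              have hh := pvPrefixHead kv (by rw [heq]; simp [hin]) c t hp'
              have := pvHitL_mem kv (by rw [heq]; simp [hin])
              rw [hh, hfm] at this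
              have hkv : kv = (kl, vl) := by injection this with h'; exact h'.symm
              exact hnotin (hkv ▸ hin)
            obtain ⟨o, os, rfl⟩ : ∃ o os, kl = o :: os := by
              cases hkk : kl with
              | nil =>
                exfalso
                exact (hg.1 (kl, vl) hmem.1).1 (by rw [hkk])
              | cons a b => exact ⟨a, b, rfl⟩
            obtain ⟨x, hkx⟩ := hpre
            have hpair := hg.2
            rw [heq] at hpair
            rw [List.pairwise_append] at hpair
            have hbar : ∀ l ∈ ps₂, pvNoEdge l.1 (o :: os) ∧ l.1.head! ∉ vl := by
              intro l hl
              exact (List.pairwise_cons.mp hpair.2.1).1 l hl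
            have hedge : ∀ e ∈ ps₁, pvNoEdge (o :: os) e.1 := by
              intro e he
              exact (hpair.2.2 e he ((o :: os), vl) (by simp)).1
            have hsplit : ∀ z, pvF pvTable z = pvF ps₂ (pvRepl o os vl (pvF ps₁ z)) := by
              intro z
              rw [heq, pvFSplit]
              rfl
            have hC1 : ∀ kv ∈ ps₁, (kv.1 : List Char) ≠ [] := by
              intro z hz
              exact (hg.1 z (by rw [heq]; simp [hz])).1
            have hC2 : ∀ kv ∈ ps₂, (kv.1 : List Char) ≠ [] := by
              intro z hz
              exact (hg.1 z (by rw [heq]; simp [hz])).1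
            have hF1 : pvF ps₁ (c :: t) = (o :: os) ++ pvF ps₁ x := by
              rw [← hkx]
              exact pvFAppendNoEdge (o :: os) ps₁ (fun z hz => ⟨hC1 z hz, hedge z hz⟩) x
            have hstep : pvF pvTable (c :: t) = vl ++ pvF pvTable x := by
              rw [hsplit, hF1, pvReplSelf,
                pvFAppendBarrier vl ps₂ (fun z hz => ⟨hC2 z hz, (hbar z hz).2⟩), hsplit x]
            have hx : x.length ≤ n := by
              have := congrArg List.length hkx
              simp only [List.length_append, List.length_cons] at this hs
              omega
            have hdrop : t.drop ((o :: os).length - 1) = x := by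
              have hot : os ++ x = t := by
                have := hkx
                simp only [List.cons_append, List.cons.injEq] at this
                exact this.2
              simp only [List.length_cons, Nat.add_sub_cancel]
              rw [← hot, List.drop_left]
            rw [hstep, ih x hx, pvGo_some c t p hp1,
              if_pos (by rw [hk1, List.isPrefixOf_iff_prefix]; exact ⟨x, hkx⟩),
              hk1, hk2, hdrop]
          · -- the unique candidate fails: no key matches here
            have hnp : ∀ kv ∈ pvTable, ¬ kv.1 <+: (c :: t) := by
              intro kv hm hp'
              have hh := pvPrefixHead kv hm c t hp'
              have := pvHitL_mem kv hm
              rw [hh, hfm] at this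
              have hkv : kv = (kl, vl) := by injection this with h'; exact h'.symm
              exact hpre (by simpa [hkv] using hp')
            have h4 := pvFConsOfNoMatch pvHeads c t pvTable hg.1 hnp t (Or.inl rfl)
            rw [h4.1, ih t (by simp only [List.length_cons] at hs; omega), pvGo_some c t p hp1,
              if_neg (by rw [hk1, List.isPrefixOf_iff_prefix]; exact hpre)]
  exact fun s => key s.length s (le_refl _)

-- ===== VERDICT (by name: the statement is the Claim_ definition above) =====
theorem replace_common_english_spec : Claim_equal_replace_common_english := by
  intro text _
  show String.mk (pvTable.foldl (fun t kv => PySem.Chars.replace t kv.1 kv.2) text.toList)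
    = replace_common_english_alt text
  unfold replace_common_english_alt
  rw [pvFoldEq pvTable (fun kv h => (pvTableGood.1 kv h).1) text.toList, pvMainGo]
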